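-- pv_equiv track=rewrite | github.com/Songhee99/Algorithm | python/programmers/pg_lv2_n^2배열자르기.py | solution
-- ===== SOURCE A (Python) =====
-- def solution(n, left, right):
--     result = []
--     startPrev = left // n
--     startNext = left % n
--     endPrev = right // n
--     endNext = right % n
--
--     if startPrev == endPrev:
--         sameNum = startPrev + 1
--         for k in range(startNext, endNext + 1):
--             if k < sameNum: result.append(sameNum)
--             else: result.append(k + 1)
--         return result
--
--     for i in range(startPrev, endPrev + 1):
--         if i == startPrev:
--             sameNum = startPrev + 1
--             for j in range(startNext, n):
--                 if j < sameNum: result.append(sameNum)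
--                 else: result.append(j + 1)
--
--         elif i == endPrev:
--             sameNum = endPrev + 1
--             for j in range(0, endNext + 1):
--                 if j < sameNum: result.append(sameNum)
--                 else: result.append(j + 1)
--
--         else:
--             sameNum = i + 1
--             for j in range(0, n):
--                 if j < sameNum: result.append(sameNum)
--                 else: result.append(j + 1)
--
--     return result
-- ===== SOURCE B (Python) =====
-- def solution(n, left, right):
--     return [max(p // n, p % n) + 1 for p in range(left, right + 1)]
-- ===== Notes on version B (the rewrite author's own statement) =====
-- stated objective: simpler
-- what changed: B walks the flat indices left..right once and computes each entry by the closed form max(p//n, p%n)+1, instead of A's row-by-row 2D traversal with a same-row special case, three row arms (start partial / middle full / end partial) and a per-element branch.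
-- outside the precondition, e.g. on solution(-5, -30, -29): A returns [], B returns [7, 6]
import Mathlib
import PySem

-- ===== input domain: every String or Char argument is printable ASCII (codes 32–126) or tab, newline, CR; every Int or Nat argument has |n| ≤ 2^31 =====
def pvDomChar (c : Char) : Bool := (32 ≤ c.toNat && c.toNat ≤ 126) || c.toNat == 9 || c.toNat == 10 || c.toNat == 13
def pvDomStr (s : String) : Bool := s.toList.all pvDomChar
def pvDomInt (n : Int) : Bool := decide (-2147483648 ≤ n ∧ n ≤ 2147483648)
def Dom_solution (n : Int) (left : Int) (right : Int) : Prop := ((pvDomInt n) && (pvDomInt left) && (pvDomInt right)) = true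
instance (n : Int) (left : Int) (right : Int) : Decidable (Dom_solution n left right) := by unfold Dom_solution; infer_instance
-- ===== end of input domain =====

-- B replaces A's 2D row-by-row traversal (same-row case + three row arms) by one pass
-- over the flat indices with the closed form max(p//n, p%n)+1; objective: simpler.

-- ===== PORT A =====
def innerBody (sameNum : Int) (acc : List Int) (j : Int) : List Int :=
  if j < sameNum then acc ++ [sameNum] else acc ++ [j + 1]

def solution (n : Int) (left : Int) (right : Int) : List Int :=
  let startPrev := PySem.Int.floordiv left n
  let startNext := PySem.Int.mod left n
  let endPrev := PySem.Int.floordiv right n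
  let endNext := PySem.Int.mod right n
  if startPrev = endPrev then
    (PySem.List.pyRange startNext (endNext + 1) 1).foldl (innerBody (startPrev + 1)) []
  else
    (PySem.List.pyRange startPrev (endPrev + 1) 1).foldl
      (fun acc i =>
        if i = startPrev then
          (PySem.List.pyRange startNext n 1).foldl (innerBody (startPrev + 1)) acc
        else if i = endPrev then
          (PySem.List.pyRange 0 (endNext + 1) 1).foldl (innerBody (endPrev + 1)) acc
        else
          (PySem.List.pyRange 0 n 1).foldl (innerBody (i + 1)) acc) []

-- ===== PORT B =====
def solution_alt (n : Int) (left : Int) (right : Int) : List Int :=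
  (PySem.List.pyRange left (right + 1) 1).map
    (fun p => max (PySem.Int.floordiv p n) (PySem.Int.mod p n) + 1)

-- ===== PRECONDITION & SPEC =====
-- Pre_ restricts to the natural domain: n is the side length of the n×n array, so n ≥ 1.
-- A raises ZeroDivisionError at n = 0; for n < 0 floor division by a negative divisor makes
-- A's row decomposition meaningless (e.g. at (-5,-30,-29) A returns [] while B returns [7,6]).
def Pre_solution (n : Int) (left : Int) (right : Int) : Prop := 1 ≤ n
instance (n : Int) (left : Int) (right : Int) : Decidable (Pre_solution n left right) := by
  unfold Pre_solution; infer_instance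
def pvWitness_solution : Int × Int × Int := (3, 2, 5)

def Spec_solution (n : Int) (left : Int) (right : Int) (out : List Int) : Prop := out = solution_alt n left right
instance (n : Int) (left : Int) (right : Int) (out : List Int) : Decidable (Spec_solution n left right out) := by unfold Spec_solution; infer_instance

-- ===== CLAIM (what is proved, stated in full; the proofs are below) =====
def Claim_equal_solution : Prop := ∀ (n : Int) (left : Int) (right : Int), Dom_solution n left right → Pre_solution n left right → Spec_solution n left right (solution n left right)

-- ===== LEMMAS AND PROOFS =====

-- the flat-index value B computes
def fVal (n p : Int) : Int := max (PySem.Int.floordiv p n) (PySem.Int.mod p n) + 1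

theorem div_shift (n q a : Int) (hn : 0 < n) (h0 : 0 ≤ a) (h1 : a < n) :
    PySem.Int.floordiv (q * n + a) n = q ∧ PySem.Int.mod (q * n + a) n = a := by
  have hd : PySem.Int.floordiv (q * n + a) n = q := by
    rw [PySem.Int.floordiv_eq_iff_of_pos hn]
    constructor <;> nlinarith
  have hm := PySem.Int.floordiv_mul_add_mod (q * n + a) n
  rw [hd] at hm
  exact ⟨hd, by linarith⟩

theorem innerBody_eq (n q a : Int) (hn : 0 < n) (h0 : 0 ≤ a) (h1 : a < n) (acc : List Int) :
    innerBody (q + 1) acc a = acc ++ [fVal n (q * n + a)] := by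
  obtain ⟨hd, hm⟩ := div_shift n q a hn h0 h1
  unfold innerBody fVal
  rw [hd, hm]
  by_cases h : a < q + 1
  · rw [if_pos h, max_eq_left (by omega : a ≤ q)]
  · rw [if_neg h, max_eq_right (by omega : q ≤ a)]

-- one row segment of A equals B's map over the corresponding flat indices
theorem rowSegment (n q : Int) (hn : 1 ≤ n) :
    ∀ (t : Nat) (a : Int), 0 ≤ a → ∀ (b : Int), b ≤ n → (b - a).toNat = t →
    ∀ acc : List Int,
    (PySem.List.pyRange a b 1).foldl (innerBody (q + 1)) acc
      = acc ++ (PySem.List.pyRange (q * n + a) (q * n + b) 1).map (fVal n) := by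
  intro t
  induction t with
  | zero =>
    intro a ha b hb ht acc
    rw [PySem.List.pyRange_one_eq_nil (by omega : b ≤ a),
        PySem.List.pyRange_one_eq_nil (by omega : q * n + b ≤ q * n + a)]
    simp
  | succ t ih =>
    intro a ha b hb ht acc
    have hab : a < b := by omega
    rw [PySem.List.pyRange_one_cons hab,
        PySem.List.pyRange_one_cons (by omega : q * n + a < q * n + b)]
    simp only [List.foldl_cons, List.map_cons]
    rw [innerBody_eq n q a (by omega) ha (by omega) acc]
    rw [ih (a + 1) (by omega) b hb (by omega)]
    have h1 : q * n + a + 1 = q * n + (a + 1) := by ring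
    rw [h1, List.append_assoc]
    simp

-- the rows of A strictly after startPrev, up to and including endPrev
theorem tailRows (n : Int) (hn : 1 ≤ n) (endPrev endNext : Int)
    (h0 : 0 ≤ endNext) (h1 : endNext < n) (startPrev startNext : Int) (hs : startPrev < endPrev) :
    ∀ (t : Nat) (i0 : Int), startPrev < i0 → i0 ≤ endPrev → (endPrev - i0).toNat = t →
    ∀ acc : List Int,
    (PySem.List.pyRange i0 (endPrev + 1) 1).foldl
      (fun acc i =>
        if i = startPrev then
          (PySem.List.pyRange startNext n 1).foldl (innerBody (startPrev + 1)) acc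
        else if i = endPrev then
          (PySem.List.pyRange 0 (endNext + 1) 1).foldl (innerBody (endPrev + 1)) acc
        else
          (PySem.List.pyRange 0 n 1).foldl (innerBody (i + 1)) acc) acc
      = acc ++ (PySem.List.pyRange (i0 * n) (endPrev * n + endNext + 1) 1).map (fVal n) := by
  intro t
  induction t with
  | zero =>
    intro i0 hlo hhi ht acc
    have hie : i0 = endPrev := by omega
    subst hie
    rw [PySem.List.pyRange_one_singleton]
    simp only [List.foldl_cons, List.foldl_nil]
    rw [if_neg (by omega : ¬ i0 = startPrev)]
    simp only [if_true]
    rw [rowSegment n i0 hn (endNext + 1 - 0).toNat 0 le_rfl (endNext + 1) (by omega) rfl acc]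
    have : i0 * n + 0 = i0 * n := by ring
    rw [this]
    have : i0 * n + (endNext + 1) = i0 * n + endNext + 1 := by ring
    rw [this]
  | succ t ih =>
    intro i0 hlo hhi ht acc
    have hie : i0 < endPrev := by omega
    rw [PySem.List.pyRange_one_cons (by omega : i0 < endPrev + 1)]
    simp only [List.foldl_cons]
    rw [if_neg (by omega : ¬ i0 = startPrev), if_neg (by omega : ¬ i0 = endPrev)]
    rw [rowSegment n i0 hn (n - 0).toNat 0 le_rfl n le_rfl rfl acc]
    rw [ih (i0 + 1) (by omega) (by omega) (by omega)]
    rw [List.append_assoc, ← List.map_append]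
    have h2 : i0 * n + 0 = i0 * n := by ring
    have h3 : i0 * n + n = (i0 + 1) * n := by ring
    rw [h2, h3, ← PySem.List.pyRange_one_append (i0 * n) ((i0 + 1) * n)
          (endPrev * n + endNext + 1) (by nlinarith) (by nlinarith)]


-- ===== VERDICT (by name: the statement is the Claim_ definition above) =====
theorem solution_spec : Claim_equal_solution := by
  intro n left right _ hn
  have hn0 : (0:Int) < n := hn
  unfold Spec_solution solution solution_alt
  simp only []
  have hL := PySem.Int.floordiv_mul_add_mod left n
  have hR := PySem.Int.floordiv_mul_add_mod right n
  have hsn0 : 0 ≤ PySem.Int.mod left n := PySem.Int.mod_nonneg left hn0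
  have hsn1 : PySem.Int.mod left n < n := PySem.Int.mod_lt left hn0
  have hen0 : 0 ≤ PySem.Int.mod right n := PySem.Int.mod_nonneg right hn0
  have hen1 : PySem.Int.mod right n < n := PySem.Int.mod_lt right hn0
  set sp := PySem.Int.floordiv left n with hsp
  set sn := PySem.Int.mod left n with hsnd
  set ep := PySem.Int.floordiv right n with hep
  set en := PySem.Int.mod right n with hend
  have hf : (fun p => max (PySem.Int.floordiv p n) (PySem.Int.mod p n) + 1) = fVal n := rfl
  rw [hf]
  by_cases hpe : sp = ep
  · rw [if_pos hpe]
    rw [rowSegment n sp hn (en + 1 - sn).toNat sn hsn0 (en + 1) (by omega) rfl []]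
    have e1 : sp * n + sn = left := by linarith
    have e2 : sp * n + (en + 1) = right + 1 := by rw [hpe]; linarith
    rw [e1, e2, List.nil_append]
  · rw [if_neg hpe]
    rcases lt_or_gt_of_ne hpe with hlt | hgt
    · -- sp < ep : first row, then tailRows
      rw [PySem.List.pyRange_one_cons (by omega : sp < ep + 1)]
      simp only [List.foldl_cons, if_true]
      rw [rowSegment n sp hn (n - sn).toNat sn hsn0 n le_rfl rfl []]
      rw [List.nil_append]
      rw [tailRows n hn ep en hen0 hen1 sp sn hlt (ep - (sp + 1)).toNat (sp + 1)
            (by omega) (by omega) rfl]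
      rw [← List.map_append]
      have h3 : sp * n + n = (sp + 1) * n := by ring
      rw [h3]
      have e1 : sp * n + sn = left := by linarith
      have e2 : ep * n + en + 1 = right + 1 := by linarith
      rw [e1, e2]
      rw [← PySem.List.pyRange_one_append left ((sp + 1) * n) (right + 1)
            (by nlinarith) (by nlinarith)]
    · -- ep < sp : both sides empty
      rw [PySem.List.pyRange_one_eq_nil (by omega : ep + 1 ≤ sp)]
      rw [PySem.List.pyRange_one_eq_nil (by nlinarith : right + 1 ≤ left)]
      simp
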